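-- pv_equiv track=rewrite | github.com/danielcatto/curso_coursera | exercicio/jogo_nim_3.py | computador_escolhe_jogada
-- ===== SOURCE A (Python) =====
-- def computador_escolhe_jogada(n , m):
--     loop = True
--     cont = m
--     if(n == m):
--         return m
--     elif(n - m == 1):
--         return m
--     else:
--         while(loop):
--             if(((n - cont ) % (m+1))== 0):
--                 loop = False
--             cont = cont  - 1
--     cont = cont + 1
--     if(cont<= 0):
--         cont=m
--     return cont
-- ===== SOURCE B (Python) =====
-- def computador_escolhe_jogada(n, m):
--     if n == m or n - m == 1:
--         return m
--     r = n % (m + 1)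
--     return r if r > 0 else m
-- ===== Notes on version B (the rewrite author's own statement) =====
-- stated objective: faster
-- what changed: Replaced A's descending while-loop search for the largest cont <= m with (n-cont) % (m+1) == 0 by a single modular computation r = n % (m+1) (returning m when r <= 0), with the same early returns.
import Mathlib
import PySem

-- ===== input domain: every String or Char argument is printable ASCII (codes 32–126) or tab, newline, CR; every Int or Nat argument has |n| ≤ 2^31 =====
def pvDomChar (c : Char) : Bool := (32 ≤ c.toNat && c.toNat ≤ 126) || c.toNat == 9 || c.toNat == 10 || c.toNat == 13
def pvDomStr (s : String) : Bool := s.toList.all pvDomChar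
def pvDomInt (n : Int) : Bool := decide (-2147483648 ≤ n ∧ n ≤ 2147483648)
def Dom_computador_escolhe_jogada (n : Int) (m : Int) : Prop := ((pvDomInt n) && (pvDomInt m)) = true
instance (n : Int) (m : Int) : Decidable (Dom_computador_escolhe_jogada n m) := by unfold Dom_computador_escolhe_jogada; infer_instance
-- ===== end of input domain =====

-- B replaces A's descending while-loop search by one modular computation r = n % (m+1).

-- ===== PORT A =====
-- A's while loop: decrement cont from m until (n - cont) % (m+1) == 0 (the fuel is a pure
-- totality guard; |m+1|+1 iterations always suffice when m+1 ≠ 0, as the proof below shows).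
def pvLoopA (n m : Int) : Nat → Int → Int
  | 0, cont => cont
  | fuel + 1, cont =>
      if PySem.Int.mod (n - cont) (m + 1) = 0 then cont - 1
      else pvLoopA n m fuel (cont - 1)

def computador_escolhe_jogada (n : Int) (m : Int) : Int :=
  if n = m then m
  else if n - m = 1 then m
  else
    let cont := pvLoopA n m ((m + 1).natAbs + 1) m
    let cont2 := cont + 1
    if cont2 ≤ 0 then m else cont2

-- ===== PORT B =====
def computador_escolhe_jogada_alt (n : Int) (m : Int) : Int :=
  if n = m ∨ n - m = 1 then m
  else
    let r := PySem.Int.mod n (m + 1)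
    if 0 < r then r else m

-- ===== PRECONDITION & SPEC =====
-- Pre_ excludes exactly the inputs where Python A raises ZeroDivisionError
-- (m = -1 with neither early-return branch taken); B raises there too.
def Pre_computador_escolhe_jogada (n : Int) (m : Int) : Prop := n = m ∨ n - m = 1 ∨ m ≠ -1
instance (n : Int) (m : Int) : Decidable (Pre_computador_escolhe_jogada n m) := by unfold Pre_computador_escolhe_jogada; infer_instance
def pvWitness_computador_escolhe_jogada : Int × Int := (7, 3)

def Spec_computador_escolhe_jogada (n : Int) (m : Int) (out : Int) : Prop := out = computador_escolhe_jogada_alt n m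
instance (n : Int) (m : Int) (out : Int) : Decidable (Spec_computador_escolhe_jogada n m out) := by unfold Spec_computador_escolhe_jogada; infer_instance

-- ===== CLAIM (what is proved, stated in full; the proofs are below) =====
def Claim_equal_computador_escolhe_jogada : Prop := ∀ (n : Int) (m : Int), Dom_computador_escolhe_jogada n m → Pre_computador_escolhe_jogada n m → Spec_computador_escolhe_jogada n m (computador_escolhe_jogada n m)

-- ===== LEMMAS AND PROOFS =====

-- If the stop condition first holds after j decrements (j < fuel), the loop stops there.
lemma pvLoopA_spec (n m : Int) : ∀ (j fuel : Nat) (cont : Int), j < fuel →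
    (∀ i : Nat, i < j → PySem.Int.mod (n - (cont - i)) (m + 1) ≠ 0) →
    PySem.Int.mod (n - (cont - j)) (m + 1) = 0 →
    pvLoopA n m fuel cont = cont - j - 1 := by
  intro j
  induction j with
  | zero =>
    intro fuel cont hf _ hj
    match fuel, hf with
    | fuel + 1, _ =>
      simp only [pvLoopA]
      rw [if_pos (by simpa using hj)]
      push_cast
      ring
  | succ j ih =>
    intro fuel cont hf hmin hj
    match fuel, hf with
    | fuel + 1, hf =>
      simp only [pvLoopA]
      rw [if_neg (by simpa using hmin 0 (Nat.succ_pos _))]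
      have := ih fuel (cont - 1) (by omega)
        (fun i hi => by
          have := hmin (i + 1) (by omega)
          rwa [show cont - (↑(i + 1) : Int) = cont - 1 - i by push_cast; ring] at this)
        (by rwa [show cont - 1 - (j : Int) = cont - ((j : Nat) + 1 : Nat) by push_cast; ring])
      rw [this]; push_cast; ring

theorem computador_escolhe_jogada_spec : Claim_equal_computador_escolhe_jogada := by
  intro n m _ hpre
  unfold Spec_computador_escolhe_jogada computador_escolhe_jogada computador_escolhe_jogada_alt
  by_cases h1 : n = m
  · rw [if_pos h1, if_pos (Or.inl h1)]
  by_cases h2 : n - m = 1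
  · rw [if_neg h1, if_pos h2, if_pos (Or.inr h2)]
  have hd : m + 1 ≠ 0 := by
    rcases hpre with h | h | h
    · exact absurd h h1
    · exact absurd h h2
    · omega
  rw [if_neg h1, if_neg h2, if_neg (not_or.mpr ⟨h1, h2⟩)]
  show (if pvLoopA n m ((m + 1).natAbs + 1) m + 1 ≤ 0 then m
        else pvLoopA n m ((m + 1).natAbs + 1) m + 1)
      = (if 0 < PySem.Int.mod n (m + 1) then PySem.Int.mod n (m + 1) else m)
  rcases lt_or_gt_of_ne hd with hneg | hpos
  · -- m + 1 < 0 : the loop stops at cont = m - j ≤ m ≤ -2, so A returns m; B's r ≤ 0, so B returns m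
    set p : Int := -(m + 1) with hp
    have hp0 : 0 < p := by omega
    set j : Int := (m - n) % p with hjdef
    have hj0 : 0 ≤ j := Int.emod_nonneg _ (by omega)
    have hjp : j < p := Int.emod_lt_of_pos _ hp0
    have hq : p ∣ (m - n) - j := by
      rw [hjdef, Int.emod_def]
      exact ⟨(m - n) / p, by ring⟩
    have hstop : PySem.Int.mod (n - (m - j)) (m + 1) = 0 := by
      rw [PySem.Int.mod_eq_zero_iff_dvd]
      have h' : (m + 1) ∣ (m - n) - j := by rwa [← Int.neg_dvd, ← hp]
      have h'' : (m + 1) ∣ -((m - n) - j) := dvd_neg.mpr h'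
      rwa [show -((m - n) - j) = n - (m - j) by ring] at h''
    have hmin : ∀ i : Nat, (i : Int) < j → PySem.Int.mod (n - (m - i)) (m + 1) ≠ 0 := by
      intro i hi hcon
      rw [PySem.Int.mod_eq_zero_iff_dvd] at hcon
      have h2' : p ∣ n - (m - i) := by rw [hp, Int.neg_dvd]; exact hcon
      have hsum : p ∣ ((m - n) - j) + (n - (m - i)) := dvd_add hq h2'
      rw [show ((m - n) - j) + (n - (m - i)) = (i : Int) - j by ring] at hsum
      have hdn : p ∣ j - (i : Int) := by
        rw [show j - (i : Int) = -((i : Int) - j) by ring]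
        exact dvd_neg.mpr hsum
      have hle : p ≤ j - i := Int.le_of_dvd (by omega) hdn
      omega
    have hrun := pvLoopA_spec n m j.toNat ((m + 1).natAbs + 1) m
      (by omega)
      (fun i hi => hmin i (by omega))
      (by rw [show ((j.toNat : Int)) = j by omega]; exact hstop)
    rw [hrun, if_pos (by omega)]
    have hB := PySem.Int.mod_neg_bounds n (b := m + 1) hneg
    rw [if_neg (by omega)]
  · -- 0 < m + 1 : the loop stops at cont = n % (m+1) = r; both sides return (if r > 0 then r else m)
    set r : Int := PySem.Int.mod n (m + 1) with hrdef
    have hr0 : 0 ≤ r := PySem.Int.mod_nonneg n hpos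
    have hrm : r < m + 1 := PySem.Int.mod_lt n hpos
    have hdvdr : (m + 1) ∣ n - r := by
      have hfm := PySem.Int.floordiv_mul_add_mod n (m + 1)
      exact ⟨PySem.Int.floordiv n (m + 1), by rw [mul_comm]; linarith⟩
    set j : Int := m - r with hjdef
    have hj0 : 0 ≤ j := by omega
    have hstop : PySem.Int.mod (n - (m - j)) (m + 1) = 0 := by
      rw [PySem.Int.mod_eq_zero_iff_dvd]
      rwa [show n - (m - j) = n - r by rw [hjdef]; ring]
    have hmin : ∀ i : Nat, (i : Int) < j → PySem.Int.mod (n - (m - i)) (m + 1) ≠ 0 := by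
      intro i hi hcon
      rw [PySem.Int.mod_eq_zero_iff_dvd] at hcon
      have hsub : (m + 1) ∣ (n - r) - (n - (m - i)) := dvd_sub hdvdr hcon
      rw [show (n - r) - (n - (m - i)) = m - i - r by ring] at hsub
      have hle : m + 1 ≤ m - i - r := Int.le_of_dvd (by omega) hsub
      omega
    have hrun := pvLoopA_spec n m j.toNat ((m + 1).natAbs + 1) m
      (by omega)
      (fun i hi => hmin i (by omega))
      (by rw [show ((j.toNat : Int)) = j by omega]; exact hstop)
    rw [hrun]
    have hcont : m - (j.toNat : Int) - 1 + 1 = r := by omega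
    rw [hcont]
    by_cases hrpos : 0 < r
    · rw [if_neg (by omega), if_pos hrpos]
    · rw [if_pos (by omega), if_neg hrpos]
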